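-- pv_equiv track=rewrite | github.com/jinwooseok/coding-test | programmers/no_review/무인도여행.py | solution
-- ===== SOURCE A (Python) =====
-- def solution(maps):
--     answer = []
--     visited = [False]*len(maps[0])*len(maps)
--     for i in range(len(maps)):
--         for j in range(len(maps[0])):
--             if visited[i*len(maps[0])+j]==False and maps[i][j] != "X":
--                 visited, count = dfs(maps, i, j, visited, 0)
--                 answer.append(count)
--
--     if len(answer) == 0:
--         return [-1]
--     else:
--         return sorted(answer)
--
-- MOVE = [(0, 1), (1, 0),(-1,0),(0,-1)]
--
-- def dfs(maps, r, c, visited, count):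
--     visited[r*len(maps[0])+c]=True
--     count += int(maps[r][c])
--
--     for mr, mc in MOVE:
--         new_r, new_c = r + mr, c + mc
--         if new_r < 0 or new_c < 0 or new_r >= len(maps) or new_c >= len(maps[0]) or maps[new_r][new_c] == "X":
--             continue
--         if visited[new_r*len(maps[0])+new_c]:
--             continue
--         visited, count = dfs(maps, new_r, new_c, visited, count)
--
--     return visited, count
-- ===== SOURCE B (Python) =====
-- def solution(maps):
--     h, w = len(maps), len(maps[0])
--     visited = [False] * (w * h)
--     sums = []
--     for i in range(h):
--         for j in range(w):
--             if visited[i * w + j] or maps[i][j] == "X":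
--                 continue
--             total = 0
--             stack = [(i, j)]
--             while stack:
--                 r, c = stack.pop()
--                 if visited[r * w + c]:
--                     continue
--                 visited[r * w + c] = True
--                 total += int(maps[r][c])
--                 for nr, nc in ((r, c - 1), (r - 1, c), (r + 1, c), (r, c + 1)):
--                     if 0 <= nr < h and 0 <= nc < w and maps[nr][nc] != "X" and not visited[nr * w + nc]:
--                         stack.append((nr, nc))
--             sums.append(total)
--     return sorted(sums) if sums else [-1]
-- ===== Notes on version B (the rewrite author's own statement) =====
-- stated objective: idiomatic
-- what changed: Replaced the recursive per-cell DFS helper by an iterative flood fill with an explicit stack (pop, skip-if-visited, mark, accumulate, push unvisited in-bounds non-X neighbours), the standard Python way to flood-fill without recursion-depth limits.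
import Mathlib
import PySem

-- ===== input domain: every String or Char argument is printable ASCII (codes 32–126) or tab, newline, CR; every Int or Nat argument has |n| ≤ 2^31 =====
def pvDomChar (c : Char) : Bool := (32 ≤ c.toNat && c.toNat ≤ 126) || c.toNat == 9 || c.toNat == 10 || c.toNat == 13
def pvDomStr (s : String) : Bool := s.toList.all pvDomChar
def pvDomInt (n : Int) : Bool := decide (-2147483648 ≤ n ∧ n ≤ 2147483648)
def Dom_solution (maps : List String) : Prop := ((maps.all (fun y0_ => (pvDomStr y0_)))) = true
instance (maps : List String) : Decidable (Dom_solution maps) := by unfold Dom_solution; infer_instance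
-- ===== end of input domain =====

-- B replaces A's recursive per-cell DFS by an iterative flood fill with an explicit stack
-- (idiomatic Python flood fill); return values are proved identical on Pre_solution.

-- ===== PORT A =====
-- shared grid helpers (both Pythons index the grid the same way)
def pvWn (maps : List String) : Nat := (maps.headD "").toList.length   -- len(maps[0]); maps ≠ [] under Pre_solution
def pvHn (maps : List String) : Nat := maps.length              -- len(maps)

-- maps[r][c]: every call site first checks 0 ≤ r < len(maps) and 0 ≤ c < len(maps[0]) ≤ len(row)
-- (rows are long enough under Pre_solution), so the getD defaults are never used: exact there.
def cellChar (maps : List String) (r c : Int) : Char :=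
  (maps.getD r.toNat "").toList.getD c.toNat 'X'

-- int(maps[r][c]); under Pre_solution the char is a decimal digit, so ofStr? is some: exact there.
def cellVal (maps : List String) (r c : Int) : Int :=
  (PySem.Int.ofStr? (String.ofList [cellChar maps r c])).getD 0

-- visited[k]: k = r*W+c is nonnegative and < len(visited) at every call site: getD is exact there.
def vget (v : List Bool) (k : Int) : Bool := v.getD k.toNat false

def MOVEA : List (Int × Int) := [(0, 1), (1, 0), (-1, 0), (0, -1)]

mutual
  -- dfs(maps, r, c, visited, count); fuel bounds the recursion depth, which in Python is at most
  -- the number of unvisited cells (each call marks one), so the fuel passed below never runs out.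
  def dfsA (maps : List String) : Nat → Int → Int → List Bool → Int → List Bool × Int
    | 0, _, _, v, cnt => (v, cnt)
    | f + 1, r, c, v, cnt =>
        dfsMovesA maps f MOVEA r c (v.set (r * (pvWn maps : Int) + c).toNat true)
          (cnt + cellVal maps r c)
  termination_by f _ _ _ _ => (f, 0)
  -- the `for mr, mc in MOVE` loop of dfs
  def dfsMovesA (maps : List String) : Nat → List (Int × Int) → Int → Int → List Bool → Int → List Bool × Int
    | _, [], _, _, v, cnt => (v, cnt)
    | f, m :: ms, r, c, v, cnt =>
        if r + m.1 < 0 ∨ c + m.2 < 0 ∨ (pvHn maps : Int) ≤ r + m.1 ∨ (pvWn maps : Int) ≤ c + m.2 ∨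
            cellChar maps (r + m.1) (c + m.2) = 'X' then
          dfsMovesA maps f ms r c v cnt
        else if vget v ((r + m.1) * (pvWn maps : Int) + (c + m.2)) then
          dfsMovesA maps f ms r c v cnt
        else
          let p := dfsA maps f (r + m.1) (c + m.2) v cnt
          dfsMovesA maps f ms r c p.1 p.2
  termination_by f ms _ _ _ _ => (f, ms.length + 1)
end

def solution (maps : List String) : List Int :=
  let H : Int := (pvHn maps : Int)
  let W : Int := (pvWn maps : Int)
  let res := (PySem.List.pyRange 0 H 1).foldl (fun (acc : List Int × List Bool) i =>
      (PySem.List.pyRange 0 W 1).foldl (fun (acc : List Int × List Bool) j =>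
          if vget acc.2 (i * W + j) = false ∧ cellChar maps i j ≠ 'X' then
            let p := dfsA maps (pvWn maps * pvHn maps + 1) i j acc.2 0
            (acc.1 ++ [p.2], p.1)
          else acc) acc)
    (([] : List Int), List.replicate (pvWn maps * pvHn maps) false)
  if res.1.length = 0 then [-1] else PySem.List.sorted res.1 (fun x => x)

-- ===== PORT B =====
-- the `while stack:` loop of Source B; fuel bounds the number of visit steps (each marks one
-- unvisited cell), so the fuel passed below never runs out.
def runB (maps : List String) : Nat → List (Int × Int) → List Bool → Int → List Bool × Int
  | _, [], v, tot => (v, tot)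
  | f, p :: rest, v, tot =>
      if vget v (p.1 * (pvWn maps : Int) + p.2) then
        runB maps f rest v tot
      else
        match f with
        | 0 => (v, tot)
        | g + 1 =>
            let v1 := v.set (p.1 * (pvWn maps : Int) + p.2).toNat true
            let tot1 := tot + cellVal maps p.1 p.2
            let stack1 := [(p.1, p.2 - 1), (p.1 - 1, p.2), (p.1 + 1, p.2), (p.1, p.2 + 1)].foldl
              (fun s n =>
                if 0 ≤ n.1 ∧ n.1 < (pvHn maps : Int) ∧ 0 ≤ n.2 ∧ n.2 < (pvWn maps : Int) ∧
                    cellChar maps n.1 n.2 ≠ 'X' ∧ vget v1 (n.1 * (pvWn maps : Int) + n.2) = false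
                then n :: s else s) rest
            runB maps g stack1 v1 tot1
termination_by f stack _ _ => (f, stack.length)

def solution_alt (maps : List String) : List Int :=
  let h : Int := (pvHn maps : Int)
  let w : Int := (pvWn maps : Int)
  let res := (PySem.List.pyRange 0 h 1).foldl (fun (acc : List Int × List Bool) i =>
      (PySem.List.pyRange 0 w 1).foldl (fun (acc : List Int × List Bool) j =>
          if vget acc.2 (i * w + j) = true ∨ cellChar maps i j = 'X' then acc
          else
            let p := runB maps (pvWn maps * pvHn maps + 1) [(i, j)] acc.2 0
            (acc.1 ++ [p.2], p.1)) acc)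
    (([] : List Int), List.replicate (pvWn maps * pvHn maps) false)
  if res.1 = [] then [-1] else PySem.List.sorted res.1 (fun x => x)

-- ===== PRECONDITION & SPEC =====
-- Pre_ excludes exactly the inputs on which the Python A raises: empty maps (IndexError on
-- maps[0]), a row shorter than len(maps[0]) (IndexError when the row-major scan reaches the
-- missing cell), and a cell in the first len(maps[0]) columns that is neither 'X' nor a digit
-- (ValueError in int()).
def Pre_solution (maps : List String) : Prop :=
  maps ≠ [] ∧ ∀ row ∈ maps, pvWn maps ≤ row.toList.length ∧
    (row.toList.take (pvWn maps)).all (fun ch => ch == 'X' || ch.isDigit) = true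
instance (maps : List String) : Decidable (Pre_solution maps) := by
  unfold Pre_solution; infer_instance

def pvWitness_solution : List String := ["X1", "22"]

def Spec_solution (maps : List String) (out : List Int) : Prop := out = solution_alt maps
instance (maps : List String) (out : List Int) : Decidable (Spec_solution maps out) := by
  unfold Spec_solution; infer_instance

-- ===== CLAIM (what is proved, stated in full; the proofs are below) =====
def Claim_equal_solution : Prop := ∀ (maps : List String), Dom_solution maps → Pre_solution maps → Spec_solution maps (solution maps)

-- ===== LEMMAS AND PROOFS =====

-- unvisited-cell count: the fuel measure
def uv (v : List Bool) : Nat := v.count false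

-- pointwise growth of the visited array
def vle (v w : List Bool) : Prop := ∀ k : Nat, v.getD k false = true → w.getD k false = true

-- in-grid non-'X' cell
def validC (maps : List String) (p : Int × Int) : Prop :=
  0 ≤ p.1 ∧ p.1 < (pvHn maps : Int) ∧ 0 ≤ p.2 ∧ p.2 < (pvWn maps : Int) ∧
    cellChar maps p.1 p.2 ≠ 'X'

def idxI (maps : List String) (p : Int × Int) : Int := p.1 * (pvWn maps : Int) + p.2

-- B's push filter, evaluated against the visited array at push time
def keepP (maps : List String) (v1 : List Bool) (n : Int × Int) : Bool :=
  decide (0 ≤ n.1 ∧ n.1 < (pvHn maps : Int) ∧ 0 ≤ n.2 ∧ n.2 < (pvWn maps : Int) ∧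
    cellChar maps n.1 n.2 ≠ 'X' ∧ vget v1 (n.1 * (pvWn maps : Int) + n.2) = false)

-- reference sequential processing of a worklist with A's dfs (fuel length+1 is always enough)
def procAll (maps : List String) : List (Int × Int) → List Bool → Int → List Bool × Int
  | [], v, cnt => (v, cnt)
  | p :: rest, v, cnt =>
      if vget v (idxI maps p) then procAll maps rest v cnt
      else
        let q := dfsA maps (v.length + 1) p.1 p.2 v cnt
        procAll maps rest q.1 q.2

lemma idxI_toNat (maps : List String) (p : Int × Int) (h : validC maps p) :
    (idxI maps p).toNat = p.1.toNat * pvWn maps + p.2.toNat ∧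
      (idxI maps p).toNat < pvWn maps * pvHn maps := by
  obtain ⟨h1, h2, h3, h4, -⟩ := h
  have ha : p.1 = (p.1.toNat : Int) := (Int.toNat_of_nonneg h1).symm
  have hb : p.2 = (p.2.toNat : Int) := (Int.toNat_of_nonneg h3).symm
  have ha' : p.1.toNat < pvHn maps := by omega
  have hb' : p.2.toNat < pvWn maps := by omega
  have hidx : idxI maps p = ((p.1.toNat * pvWn maps + p.2.toNat : Nat) : Int) := by
    have hc : ((p.1.toNat * pvWn maps + p.2.toNat : Nat) : Int) = p.1 * (pvWn maps : Int) + p.2 := by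
      push_cast; rw [← ha, ← hb]
    rw [idxI, hc]
  constructor
  · rw [hidx]; exact Int.toNat_natCast _
  · rw [hidx, Int.toNat_natCast]
    calc p.1.toNat * pvWn maps + p.2.toNat
        < p.1.toNat * pvWn maps + pvWn maps := by omega
      _ = (p.1.toNat + 1) * pvWn maps := by ring
      _ ≤ pvHn maps * pvWn maps := Nat.mul_le_mul_right _ (by omega)
      _ = pvWn maps * pvHn maps := Nat.mul_comm _ _

lemma uv_pos (v : List Bool) (k : Nat) (hk : k < v.length) (hf : v.getD k false = false) :
    (v.set k true).count false + 1 = v.count false := by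
  induction v generalizing k with
  | nil => simp at hk
  | cons a t ih =>
    cases k with
    | zero => simp_all [List.count_cons, List.getD]
    | succ k =>
      simp only [List.set, List.count_cons]
      have := ih k (by simpa using hk) (by simpa [List.getD] using hf)
      omega

lemma count_false_le (v w : List Bool) (hlen : v.length = w.length) (h : vle v w) :
    w.count false ≤ v.count false := by
  induction v generalizing w with
  | nil => cases w <;> simp_all
  | cons a t ih =>
    cases w with
    | nil => simp at hlen
    | cons b u =>
      have hhead := h 0
      have htail := ih u (by simpa using hlen) (fun k => by simpa [List.getD] using h (k + 1))
      simp only [List.count_cons]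
      cases a <;> cases b <;> simp_all <;> omega

lemma vle_refl (v : List Bool) : vle v v := fun _ h => h

lemma vle_trans {a b c : List Bool} (h1 : vle a b) (h2 : vle b c) : vle a c :=
  fun k h => h2 k (h1 k h)

lemma vle_set (v : List Bool) (k : Nat) : vle v (v.set k true) := by
  intro j h
  rcases eq_or_ne j k with rfl | hne
  · by_cases hk : j < v.length
    · simp [List.getD_eq_getElem?_getD, List.getElem?_set_self hk]
    · simpa [List.set_eq_of_length_le (by omega : v.length ≤ j)] using h
  · simpa [List.getD_eq_getElem?_getD, List.getElem?_set_ne (by omega : k ≠ j)] using h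

-- length preservation
lemma dfsMovesA_len (maps : List String) (f : Nat)
    (hA : ∀ r c v cnt, (dfsA maps f r c v cnt).1.length = v.length) :
    ∀ ms r c v cnt, (dfsMovesA maps f ms r c v cnt).1.length = v.length := by
  intro ms
  induction ms with
  | nil => intro r c v cnt; simp [dfsMovesA]
  | cons m ms ih =>
    intro r c v cnt
    simp only [dfsMovesA]
    split_ifs
    · exact ih r c v cnt
    · exact ih r c v cnt
    · rw [ih]; exact hA _ _ _ _

lemma dfsA_len (maps : List String) :
    ∀ f r c (v : List Bool) cnt, (dfsA maps f r c v cnt).1.length = v.length := by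
  intro f
  induction f with
  | zero => intro r c v cnt; simp [dfsA]
  | succ f ih =>
    intro r c v cnt
    simp only [dfsA]
    rw [dfsMovesA_len maps f (fun r c v cnt => ih r c v cnt)]
    exact List.length_set ..

-- monotonicity: visited flags are only ever set
lemma dfsMovesA_mono (maps : List String) (f : Nat)
    (hA : ∀ r c v cnt, vle v (dfsA maps f r c v cnt).1) :
    ∀ ms r c v cnt, vle v (dfsMovesA maps f ms r c v cnt).1 := by
  intro ms
  induction ms with
  | nil => intro r c v cnt; simp only [dfsMovesA]; exact vle_refl v
  | cons m ms ih =>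
    intro r c v cnt
    simp only [dfsMovesA]
    split_ifs
    · exact ih r c v cnt
    · exact ih r c v cnt
    · exact vle_trans (hA _ _ v cnt) (ih r c _ _)

lemma dfsA_mono (maps : List String) :
    ∀ f r c (v : List Bool) cnt, vle v (dfsA maps f r c v cnt).1 := by
  intro f
  induction f with
  | zero => intro r c v cnt; simp only [dfsA]; exact vle_refl v
  | succ f ih =>
    intro r c v cnt
    simp only [dfsA]
    exact vle_trans (vle_set v _) (dfsMovesA_mono maps f (fun r c v cnt => ih r c v cnt) MOVEA r c _ _)

lemma dfsA_uv (maps : List String) (f : Nat) (r c : Int) (v : List Bool) (cnt : Int) :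
    uv (dfsA maps f r c v cnt).1 ≤ uv v :=
  count_false_le v _ (dfsA_len maps f r c v cnt).symm (dfsA_mono maps f r c v cnt)

-- fuel irrelevance: any fuel ≥ uv v computes the same result
lemma dfsA_fuel (maps : List String) :
    ∀ f g (p : Int × Int) (v : List Bool) cnt, uv v ≤ f → uv v ≤ g →
      vget v (idxI maps p) = false → (idxI maps p).toNat < v.length →
      v.length = pvWn maps * pvHn maps →
      dfsA maps f p.1 p.2 v cnt = dfsA maps g p.1 p.2 v cnt := by
  intro f
  induction f with
  | zero =>
    intro g p v cnt hf hg hunv hrange hlen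
    have := uv_pos v (idxI maps p).toNat hrange (by simpa [vget, idxI] using hunv)
    simp only [uv] at hf
    omega
  | succ f ih =>
    intro g p v cnt hf hg hunv hrange hlen
    cases g with
    | zero =>
      have := uv_pos v (idxI maps p).toNat hrange (by simpa [vget, idxI] using hunv)
      simp only [uv] at hg
      omega
    | succ g =>
      have hdec := uv_pos v (idxI maps p).toNat hrange (by simpa [vget, idxI] using hunv)
      have key : ∀ ms (r c : Int) (v : List Bool) cnt, uv v ≤ f → uv v ≤ g →
          v.length = pvWn maps * pvHn maps →
          dfsMovesA maps f ms r c v cnt = dfsMovesA maps g ms r c v cnt := by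
        intro ms
        induction ms with
        | nil => intro r c v cnt _ _ _; simp [dfsMovesA]
        | cons m ms ihm =>
          intro r c v cnt hf' hg' hlen'
          simp only [dfsMovesA]
          split_ifs with h1 h2
          · exact ihm r c v cnt hf' hg' hlen'
          · exact ihm r c v cnt hf' hg' hlen'
          · push_neg at h1
            have hval : validC maps (r + m.1, c + m.2) :=
              ⟨by omega, by omega, by omega, by omega, h1.2.2.2.2⟩
            have hunv' : vget v (idxI maps (r + m.1, c + m.2)) = false := by
              simpa [idxI] using eq_false_of_ne_true h2
            have hrange' : (idxI maps (r + m.1, c + m.2)).toNat < v.length :=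
              hlen' ▸ (idxI_toNat maps _ hval).2
            have heq := ih g (r + m.1, c + m.2) v cnt hf' hg' hunv' hrange' hlen'
            simp only [heq]
            exact ihm r c _ _
              (le_trans (dfsA_uv maps g _ _ v cnt) hf')
              (le_trans (dfsA_uv maps g _ _ v cnt) hg')
              (by rw [dfsA_len]; exact hlen')
      simp only [dfsA]
      refine key MOVEA p.1 p.2 _ _ ?_ ?_ ?_
      · simp only [uv] at *
        have : idxI maps p = p.1 * (pvWn maps : Int) + p.2 := rfl
        rw [← this]; omega
      · simp only [uv] at *
        have : idxI maps p = p.1 * (pvWn maps : Int) + p.2 := rfl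
        rw [← this]; omega
      · rw [List.length_set]; exact hlen

-- A's move loop processes exactly the cells B pushes, re-checking visitedness at its own time
lemma dfsMovesA_eq_procAll (maps : List String) (v1 : List Bool) :
    ∀ ms r c f (v : List Bool) cnt, uv v ≤ f → v.length = pvWn maps * pvHn maps →
      vle v1 v →
      dfsMovesA maps f ms r c v cnt
        = procAll maps ((ms.map (fun m => (r + m.1, c + m.2))).filter (keepP maps v1)) v cnt := by
  intro ms
  induction ms with
  | nil => intro r c f v cnt _ _ _; simp [dfsMovesA, procAll]
  | cons m ms ihm =>
    intro r c f v cnt hf hlen hmono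
    simp only [dfsMovesA, List.map_cons, List.filter_cons]
    by_cases h1 : r + m.1 < 0 ∨ c + m.2 < 0 ∨ (pvHn maps : Int) ≤ r + m.1 ∨
        (pvWn maps : Int) ≤ c + m.2 ∨ cellChar maps (r + m.1) (c + m.2) = 'X'
    · -- out of bounds or 'X': A skips, B never pushed it
      have hk : keepP maps v1 (r + m.1, c + m.2) = false := by
        simp only [keepP, decide_eq_false_iff_not]
        rintro ⟨c1, c2, c3, c4, c5, -⟩
        rcases h1 with h | h | h | h | h
        · omega
        · omega
        · omega
        · omega
        · exact c5 h
      rw [if_pos h1, hk, if_neg Bool.false_ne_true]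
      exact ihm r c f v cnt hf hlen hmono
    · by_cases h2 : vget v ((r + m.1) * (pvWn maps : Int) + (c + m.2)) = true
      · -- visited now: A skips; B either never pushed it, or pops and skips it
        rw [if_neg h1, if_pos h2]
        by_cases hk : keepP maps v1 (r + m.1, c + m.2) = true
        · rw [hk, if_pos rfl]
          simp only [procAll]
          rw [if_pos (by simpa [idxI] using h2)]
          exact ihm r c f v cnt hf hlen hmono
        · rw [eq_false_of_ne_true hk, if_neg Bool.false_ne_true]
          exact ihm r c f v cnt hf hlen hmono
      · -- unvisited: both recurse into the cell
        rw [if_neg h1, if_neg h2]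
        push_neg at h1
        have hval : validC maps (r + m.1, c + m.2) :=
          ⟨by omega, by omega, by omega, by omega, h1.2.2.2.2⟩
        have hunv : vget v (idxI maps (r + m.1, c + m.2)) = false := by
          simpa [idxI] using eq_false_of_ne_true h2
        have hunv1 : vget v1 ((r + m.1) * (pvWn maps : Int) + (c + m.2)) = false := by
          by_contra hT
          have : vget v (idxI maps (r + m.1, c + m.2)) = true := by
            have := hmono (((r + m.1) * (pvWn maps : Int) + (c + m.2)).toNat)
              (by simpa [vget] using eq_true_of_ne_false hT)
            simpa [vget, idxI] using this
          simp [this] at hunv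
        have hk : keepP maps v1 (r + m.1, c + m.2) = true := by
          simp only [keepP, decide_eq_true_eq]
          exact ⟨hval.1, hval.2.1, hval.2.2.1, hval.2.2.2.1, hval.2.2.2.2, hunv1⟩
        rw [hk, if_pos rfl]
        simp only [procAll]
        rw [if_neg (by simp [hunv])]
        have hrange : (idxI maps (r + m.1, c + m.2)).toNat < v.length :=
          hlen ▸ (idxI_toNat maps _ hval).2
        have hfa := dfsA_fuel maps f (v.length + 1) (r + m.1, c + m.2) v cnt hf
          (le_trans List.count_le_length (by omega)) hunv hrange hlen
        simp only at hfa
        rw [← hfa]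
        exact ihm r c f _ _
          (le_trans (dfsA_uv maps f _ _ v cnt) hf)
          (by rw [dfsA_len]; exact hlen)
          (vle_trans hmono (dfsA_mono maps f _ _ v cnt))

lemma procAll_append (maps : List String) :
    ∀ xs ys (v : List Bool) cnt, procAll maps (xs ++ ys) v cnt
      = procAll maps ys (procAll maps xs v cnt).1 (procAll maps xs v cnt).2 := by
  intro xs
  induction xs with
  | nil => intro ys v cnt; simp [procAll]
  | cons p xs ih =>
    intro ys v cnt
    simp only [List.cons_append, procAll]
    split_ifs
    · exact ih ys v cnt
    · exact ih ys _ _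

lemma foldl_push {α : Type} (q : α → Prop) [DecidablePred q] :
    ∀ (l rest : List α), l.foldl (fun s n => if q n then n :: s else s) rest
      = (l.filter (fun n => decide (q n))).reverse ++ rest := by
  intro l
  induction l with
  | nil => intro rest; simp
  | cons a l ih =>
    intro rest
    simp only [List.foldl_cons, List.filter_cons]
    by_cases h : q a
    · rw [if_pos h, if_pos (by simpa using h), ih, List.reverse_cons, List.append_assoc,
        List.singleton_append]
    · rw [if_neg h, if_neg (by simpa using h), ih]

-- the simulation: the explicit stack loop equals sequential dfs processing of the worklist
lemma runB_eq_procAll (maps : List String) :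
    ∀ f (stack : List (Int × Int)) (v : List Bool) cnt,
      (∀ p ∈ stack, validC maps p) → v.length = pvWn maps * pvHn maps → uv v < f →
      runB maps f stack v cnt = procAll maps stack v cnt := by
  intro f
  induction f with
  | zero => intro stack v cnt _ _ huv; omega
  | succ f ih =>
    intro stack
    induction stack with
    | nil => intro v cnt _ _ _; simp [runB, procAll]
    | cons p rest ihs =>
      intro v cnt hval hlen huv
      by_cases hvis : vget v (p.1 * (pvWn maps : Int) + p.2) = true
      · simp only [runB]
        rw [if_pos hvis]
        simp only [procAll]
        rw [if_pos (by simpa [idxI] using hvis)]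
        exact ihs v cnt (fun q hq => hval q (List.mem_cons_of_mem _ hq)) hlen huv
      · have hvalp := hval p (List.mem_cons_self ..)
        have hrange : (idxI maps p).toNat < v.length := hlen ▸ (idxI_toNat maps p hvalp).2
        have hvis' : vget v (p.1 * (pvWn maps : Int) + p.2) = false := eq_false_of_ne_true hvis
        have hdec := uv_pos v (idxI maps p).toNat hrange (by simpa [vget, idxI] using hvis')
        simp only [idxI] at hdec
        simp only [runB]
        rw [if_neg hvis]
        rw [foldl_push]
        rw [← List.filter_reverse]
        have hfilt : (fun n : Int × Int => decide (0 ≤ n.1 ∧ n.1 < (pvHn maps : Int) ∧ 0 ≤ n.2 ∧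
            n.2 < (pvWn maps : Int) ∧ cellChar maps n.1 n.2 ≠ 'X' ∧
            vget (v.set (p.1 * (pvWn maps : Int) + p.2).toNat true)
              (n.1 * (pvWn maps : Int) + n.2) = false))
            = keepP maps (v.set (p.1 * (pvWn maps : Int) + p.2).toNat true) := rfl
        rw [hfilt]
        have hrev : ([(p.1, p.2 - 1), (p.1 - 1, p.2), (p.1 + 1, p.2), (p.1, p.2 + 1)] :
            List (Int × Int)).reverse
            = [(p.1, p.2 + 1), (p.1 + 1, p.2), (p.1 - 1, p.2), (p.1, p.2 - 1)] := rfl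
        rw [hrev]
        have hlen1 : (v.set (p.1 * (pvWn maps : Int) + p.2).toNat true).length
            = pvWn maps * pvHn maps := by rw [List.length_set]; exact hlen
        have huv1 : uv (v.set (p.1 * (pvWn maps : Int) + p.2).toNat true) < f := by
          have h0 : uv v ≤ v.length := List.count_le_length
          simp only [uv, idxI] at *
          omega
        have hvalid1 : ∀ q ∈ ([(p.1, p.2 + 1), (p.1 + 1, p.2), (p.1 - 1, p.2), (p.1, p.2 - 1)] :
            List (Int × Int)).filter
              (keepP maps (v.set (p.1 * (pvWn maps : Int) + p.2).toNat true)) ++ rest,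
            validC maps q := by
          intro q hq
          rcases List.mem_append.1 hq with hq | hq
          · obtain ⟨-, hk⟩ := List.mem_filter.1 hq
            obtain ⟨a1, a2, a3, a4, a5, -⟩ := of_decide_eq_true hk
            exact ⟨a1, a2, a3, a4, a5⟩
          · exact hval q (List.mem_cons_of_mem _ hq)
        rw [ih _ _ _ hvalid1 hlen1 huv1, procAll_append]
        have hmoves : (MOVEA.map (fun m => (p.1 + m.1, p.2 + m.2)))
            = [(p.1, p.2 + 1), (p.1 + 1, p.2), (p.1 - 1, p.2), (p.1, p.2 - 1)] := by
          norm_num [MOVEA]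
          omega
        have hseq := dfsMovesA_eq_procAll maps
          (v.set (p.1 * (pvWn maps : Int) + p.2).toNat true) MOVEA p.1 p.2 v.length
          (v.set (p.1 * (pvWn maps : Int) + p.2).toNat true)
          (cnt + cellVal maps p.1 p.2)
          (by have h0 : uv v ≤ v.length := List.count_le_length
              simp only [uv] at *; omega)
          hlen1 (vle_refl _)
        rw [hmoves] at hseq
        rw [← hseq]
        simp only [procAll]
        rw [if_neg (by simp [idxI, hvis'])]
        have hunf : dfsA maps (v.length + 1) p.1 p.2 v cnt
            = dfsMovesA maps v.length MOVEA p.1 p.2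
              (v.set (p.1 * (pvWn maps : Int) + p.2).toNat true)
              (cnt + cellVal maps p.1 p.2) := by
          simp only [dfsA]
        rw [hunf]

lemma cell_step (maps : List String) (v : List Bool) (i j : Int)
    (hv : validC maps (i, j)) (hunv : vget v (i * (pvWn maps : Int) + j) = false)
    (hlen : v.length = pvWn maps * pvHn maps) :
    runB maps (pvWn maps * pvHn maps + 1) [(i, j)] v 0
      = dfsA maps (pvWn maps * pvHn maps + 1) i j v 0 := by
  rw [runB_eq_procAll maps (pvWn maps * pvHn maps + 1) [(i, j)] v 0
    (by intro q hq; simp at hq; subst hq; exact hv) hlen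
    (by have h0 : uv v ≤ v.length := List.count_le_length; omega)]
  simp only [procAll]
  rw [if_neg (by simp [idxI, hunv])]
  rw [hlen]

lemma foldl_congr_inv {α β : Type} (P : α → Prop) (f g : α → β → α) :
    ∀ (l : List β) (a : α), P a → (∀ x b, b ∈ l → P x → f x b = g x b ∧ P (f x b)) →
      l.foldl f a = l.foldl g a ∧ P (l.foldl f a) := by
  intro l
  induction l with
  | nil => intro a ha _; exact ⟨rfl, ha⟩
  | cons b l ih =>
    intro a ha hstep
    have h1 := hstep a b (List.mem_cons_self ..) ha
    simp only [List.foldl_cons]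
    rw [← h1.1]
    exact ih (f a b) h1.2 (fun x c hc => hstep x c (List.mem_cons_of_mem _ hc))

lemma vis_cond (b : Bool) (ch : Char) (hc : ¬(b = false ∧ ch ≠ 'X')) :
    b = true ∨ ch = 'X' := by
  rcases Bool.eq_false_or_eq_true b with h | h
  · exact Or.inl h
  · push_neg at hc
    exact Or.inr (hc h)

lemma inner_step (maps : List String) (i : Int) (hi : 0 ≤ i ∧ i < (pvHn maps : Int)) :
    ∀ (acc : List Int × List Bool) (j : Int), j ∈ PySem.List.pyRange 0 (pvWn maps : Int) 1 →
      acc.2.length = pvWn maps * pvHn maps →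
      (if vget acc.2 (i * (pvWn maps : Int) + j) = false ∧ cellChar maps i j ≠ 'X' then
          ((acc.1 ++ [(dfsA maps (pvWn maps * pvHn maps + 1) i j acc.2 0).2],
            (dfsA maps (pvWn maps * pvHn maps + 1) i j acc.2 0).1) : List Int × List Bool)
        else acc)
      = (if vget acc.2 (i * (pvWn maps : Int) + j) = true ∨ cellChar maps i j = 'X' then acc
        else (acc.1 ++ [(runB maps (pvWn maps * pvHn maps + 1) [(i, j)] acc.2 0).2],
              (runB maps (pvWn maps * pvHn maps + 1) [(i, j)] acc.2 0).1))
      ∧ (if vget acc.2 (i * (pvWn maps : Int) + j) = false ∧ cellChar maps i j ≠ 'X' then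
          ((acc.1 ++ [(dfsA maps (pvWn maps * pvHn maps + 1) i j acc.2 0).2],
            (dfsA maps (pvWn maps * pvHn maps + 1) i j acc.2 0).1) : List Int × List Bool)
        else acc).2.length = pvWn maps * pvHn maps := by
  intro acc j hj hP
  have hj' := (PySem.List.mem_pyRange_one).1 hj
  by_cases hc : vget acc.2 (i * (pvWn maps : Int) + j) = false ∧ cellChar maps i j ≠ 'X'
  · have hvalid : validC maps (i, j) := ⟨hi.1, hi.2, hj'.1, hj'.2, hc.2⟩
    have hcs := cell_step maps acc.2 i j hvalid hc.1 hP
    rw [if_pos hc, if_neg (by rintro (h | h) <;> simp_all), hcs]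
    exact ⟨rfl, by rw [dfsA_len]; exact hP⟩
  · rw [if_pos (vis_cond _ _ hc), if_neg hc]
    exact ⟨rfl, hP⟩

-- ===== VERDICT (by name: the statement is the Claim_ definition above) =====
theorem solution_spec : Claim_equal_solution := by
  intro maps hdom hpre
  show solution maps = solution_alt maps
  have key := foldl_congr_inv
    (fun acc : List Int × List Bool => acc.2.length = pvWn maps * pvHn maps)
    (fun acc i => (PySem.List.pyRange 0 (pvWn maps : Int) 1).foldl (fun acc j =>
        if vget acc.2 (i * (pvWn maps : Int) + j) = false ∧ cellChar maps i j ≠ 'X' then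
          ((acc.1 ++ [(dfsA maps (pvWn maps * pvHn maps + 1) i j acc.2 0).2],
            (dfsA maps (pvWn maps * pvHn maps + 1) i j acc.2 0).1) : List Int × List Bool)
        else acc) acc)
    (fun acc i => (PySem.List.pyRange 0 (pvWn maps : Int) 1).foldl (fun acc j =>
        if vget acc.2 (i * (pvWn maps : Int) + j) = true ∨ cellChar maps i j = 'X' then acc
        else (acc.1 ++ [(runB maps (pvWn maps * pvHn maps + 1) [(i, j)] acc.2 0).2],
              (runB maps (pvWn maps * pvHn maps + 1) [(i, j)] acc.2 0).1)) acc)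
    (PySem.List.pyRange 0 (pvHn maps : Int) 1)
    (([] : List Int), List.replicate (pvWn maps * pvHn maps) false)
    (by simp)
    (fun acc i hi hP => foldl_congr_inv _ _ _ _ acc hP
      (inner_step maps i ((PySem.List.mem_pyRange_one).1 hi)))
  have hif : ∀ (l : List Int),
      (if l.length = 0 then [-1] else PySem.List.sorted l (fun x => x))
        = (if l = [] then [-1] else PySem.List.sorted l (fun x => x)) := by
    intro l
    by_cases h : l = [] <;> simp [h, List.length_eq_zero_iff]
  simp only [solution, solution_alt]
  rw [key.1]
  exact hif _
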